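-- pv_equiv track=rewrite | github.com/beyond-immersion/bannou-service | scripts/generate-operations-catalog.py | extract_fallback_summary
-- ===== SOURCE A (Python) =====
-- def extract_fallback_summary(content: str) -> str:
--     """Extract first non-blank paragraph after title/header as fallback."""
--     lines = content.split('\n')
--     title_found = False
--     collecting = False
--     paragraph_lines = []
--
--     for line in lines:
--         if not title_found:
--             if line.startswith('# ') and not line.startswith('## '):
--                 title_found = True
--             continue
--
--         stripped = line.strip()
--
--         if not collecting:
--             if stripped == '' or stripped.startswith('>') or stripped == '---':
--                 continue
--             if stripped.startswith('## ') or stripped.startswith('### '):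
--                 continue
--             collecting = True
--             paragraph_lines.append(line)
--         else:
--             if stripped == '' or stripped.startswith('## ') or stripped == '---':
--                 break
--             paragraph_lines.append(line)
--
--     return '\n'.join(paragraph_lines)
-- ===== SOURCE B (Python) =====
-- def extract_fallback_summary(content: str) -> str:
--     """Extract first non-blank paragraph after title/header as fallback."""
--     lines = content.split('\n')
--
--     # lines after the H1 title; no title -> ''
--     tail = None
--     for idx, line in enumerate(lines):
--         if line.startswith('# ') and not line.startswith('## '):
--             tail = lines[idx + 1:]
--             break
--     if tail is None:
--         return ''
--
--     # split the tail into paragraph blocks at terminator lines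
--     blocks, cur = [], []
--     for line in tail:
--         s = line.strip()
--         if s == '' or s == '---' or s.startswith('## '):
--             blocks.append(cur)
--             cur = []
--         else:
--             cur.append(line)
--     blocks.append(cur)
--
--     # first block that is non-empty after shedding leading quote/H3 lines
--     for blk in blocks:
--         k = 0
--         while k < len(blk) and (blk[k].strip().startswith('>') or blk[k].strip().startswith('### ')):
--             k += 1
--         if k < len(blk):
--             return '\n'.join(blk[k:])
--     return ''
-- ===== Notes on version B (the rewrite author's own statement) =====
-- stated objective: alternative
-- what changed: B splits the post-title lines into paragraph blocks at terminator lines (blank/'---'/H2) and returns the first block that is non-empty after shedding its leading quote/H3 lines, instead of A's single-pass two-flag state machine.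
import Mathlib
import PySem

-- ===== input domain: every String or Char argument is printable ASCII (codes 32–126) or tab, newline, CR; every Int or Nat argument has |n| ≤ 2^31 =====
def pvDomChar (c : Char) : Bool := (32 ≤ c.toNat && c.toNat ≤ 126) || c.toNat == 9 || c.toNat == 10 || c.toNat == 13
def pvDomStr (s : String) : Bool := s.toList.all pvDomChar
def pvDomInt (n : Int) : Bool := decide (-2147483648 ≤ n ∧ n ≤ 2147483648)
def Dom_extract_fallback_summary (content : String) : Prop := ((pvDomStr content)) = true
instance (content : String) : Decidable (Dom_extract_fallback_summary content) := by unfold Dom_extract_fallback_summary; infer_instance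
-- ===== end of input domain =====

-- B replaces A's two-flag single-pass state machine by a block decomposition:
-- split the post-title lines into paragraph blocks at terminator lines, then
-- return the first block that survives shedding its leading quote/H3 lines.
-- Objective: alternative structure, same linear cost.

-- ===== PORT A =====
-- one loop over the lines carrying (title_found, collecting, paragraph_lines); 'break' = return acc
def afsLoop : List String → Bool → Bool → List String → List String
  | [], _, _, acc => acc
  | l :: rest, titleFound, collecting, acc =>
    if !titleFound then
      if PySem.Str.startswith l "# " && !PySem.Str.startswith l "## " then
        afsLoop rest true collecting acc
      else
        afsLoop rest titleFound collecting acc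
    else
      let s := PySem.Str.strip l
      if !collecting then
        if s == "" || PySem.Str.startswith s ">" || s == "---" then
          afsLoop rest titleFound collecting acc
        else if PySem.Str.startswith s "## " || PySem.Str.startswith s "### " then
          afsLoop rest titleFound collecting acc
        else
          afsLoop rest titleFound true (acc ++ [l])
      else
        if s == "" || PySem.Str.startswith s "## " || s == "---" then acc
        else afsLoop rest titleFound collecting (acc ++ [l])

def extract_fallback_summary (content : String) : String :=
  PySem.Str.join "\n" (afsLoop ((PySem.Str.split? content "\n").getD []) false false [])

-- ===== PORT B =====
-- the first 'for idx, line in enumerate(lines)' loop: lines after the H1 title, none = no title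
def bTail : List String → Option (List String)
  | [] => none
  | l :: rest =>
    if PySem.Str.startswith l "# " && !PySem.Str.startswith l "## " then some rest
    else bTail rest

def bIsBoundary (s : String) : Bool :=
  s == "" || s == "---" || PySem.Str.startswith s "## "

def bIsLead (s : String) : Bool :=
  PySem.Str.startswith (PySem.Str.strip s) ">" || PySem.Str.startswith (PySem.Str.strip s) "### "

-- the blocks loop: split into paragraph blocks at terminator lines ('blocks' + final 'cur')
def bBlocks : List String → List String → List (List String)
  | [], cur => [cur]
  | l :: rest, cur =>
    if bIsBoundary (PySem.Str.strip l) then cur :: bBlocks rest []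
    else bBlocks rest (cur ++ [l])

-- the inner while loop: shed the block's leading quote/H3 lines ('blk[k:]')
def bShed : List String → List String
  | [] => []
  | l :: rest => if bIsLead l then bShed rest else l :: rest

-- the final for loop: first block non-empty after shedding
def bPick : List (List String) → String
  | [] => ""
  | blk :: rest =>
    match bShed blk with
    | [] => bPick rest
    | r => PySem.Str.join "\n" r

def extract_fallback_summary_alt (content : String) : String :=
  match bTail ((PySem.Str.split? content "\n").getD []) with
  | none => ""
  | some tail => bPick (bBlocks tail [])

-- ===== PRECONDITION & SPEC =====
def Spec_extract_fallback_summary (content : String) (out : String) : Prop := out = extract_fallback_summary_alt content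
instance (content : String) (out : String) : Decidable (Spec_extract_fallback_summary content out) := by unfold Spec_extract_fallback_summary; infer_instance

-- ===== CLAIM (what is proved, stated in full; the proofs are below) =====
def Claim_equal_extract_fallback_summary : Prop := ∀ (content : String), Dom_extract_fallback_summary content → Spec_extract_fallback_summary content (extract_fallback_summary content)

-- ===== LEMMAS AND PROOFS =====
-- proof-only helper: the raw lines up to the first terminator
def pfTake : List String → List String
  | [] => []
  | l :: rest => if bIsBoundary (PySem.Str.strip l) then [] else l :: pfTake rest

-- one step of A's loop, not collecting: skip iff the line is a terminator or a lead line
theorem step_notcollect (l : String) (r acc : List String) :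
    afsLoop (l :: r) true false acc =
      if (bIsBoundary (PySem.Str.strip l) || bIsLead l) = true then afsLoop r true false acc
      else afsLoop r true true (acc ++ [l]) := by
  by_cases hE : PySem.Str.strip l = "" <;>
  by_cases hD : PySem.Str.strip l = "---" <;>
  by_cases hH : PySem.Chars.startswith (PySem.Chars.strip l.toList) ['#', '#', ' '] = true <;>
  by_cases hQ : PySem.Chars.startswith (PySem.Chars.strip l.toList) ['>'] = true <;>
  by_cases hT : PySem.Chars.startswith (PySem.Chars.strip l.toList) ['#', '#', '#', ' '] = true <;>
  simp [afsLoop, bIsBoundary, bIsLead, hE, hD, hH, hQ, hT]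

-- one step of A's loop, collecting: break iff the line is a terminator
theorem step_collect (l : String) (r acc : List String) :
    afsLoop (l :: r) true true acc =
      if bIsBoundary (PySem.Str.strip l) = true then acc
      else afsLoop r true true (acc ++ [l]) := by
  by_cases hE : PySem.Str.strip l = "" <;>
  by_cases hD : PySem.Str.strip l = "---" <;>
  by_cases hH : PySem.Chars.startswith (PySem.Chars.strip l.toList) ['#', '#', ' '] = true <;>
  simp [afsLoop, bIsBoundary, hE, hD, hH]

theorem shed_append (cur xs : List String) (h : bShed cur ≠ []) :
    bShed (cur ++ xs) = bShed cur ++ xs := by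
  induction cur with
  | nil => simp [bShed] at h
  | cons l r ih =>
    simp only [bShed, List.cons_append] at *
    by_cases hl : bIsLead l = true
    · simp [hl] at h ⊢; exact ih h
    · simp [hl]

theorem shed_all_lead (cur : List String) (h : ∀ x ∈ cur, bIsLead x = true) :
    bShed cur = [] := by
  induction cur with
  | nil => rfl
  | cons l r ih =>
    simp only [bShed, h l (by simp), if_true]
    exact ih fun x hx => h x (by simp [hx])

theorem shed_lead_append (cur : List String) (l : String) (h : ∀ x ∈ cur, bIsLead x = true)
    (hl : bIsLead l = false) : bShed (cur ++ [l]) = [l] := by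
  induction cur with
  | nil => simp [bShed, hl]
  | cons a b ih =>
    simp only [List.cons_append, bShed, h a (by simp), if_true]
    exact ih fun x hx => h x (by simp [hx])

theorem afsLoop_collect (rest : List String) (acc : List String) :
    afsLoop rest true true acc = acc ++ pfTake rest := by
  induction rest generalizing acc with
  | nil => simp [afsLoop, pfTake]
  | cons l r ih =>
    rw [step_collect]
    by_cases hb : bIsBoundary (PySem.Str.strip l) = true
    · simp [pfTake, hb]
    · simp [pfTake, hb, ih]

theorem pick_nonempty (rest cur : List String) (h : bShed cur ≠ []) :
    bPick (bBlocks rest cur) = PySem.Str.join "\n" (bShed cur ++ pfTake rest) := by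
  induction rest generalizing cur with
  | nil =>
    show bPick [cur] = _
    cases hc : bShed cur with
    | nil => exact absurd hc h
    | cons a b => simp [bPick, hc, pfTake]
  | cons l r ih =>
    simp only [bBlocks, pfTake]
    by_cases hb : bIsBoundary (PySem.Str.strip l) = true
    · simp only [hb, if_true, bPick]
      cases hc : bShed cur with
      | nil => exact absurd hc h
      | cons a b => simp
    · simp only [hb, if_false, Bool.false_eq_true]
      rw [ih (cur ++ [l]) (by rw [shed_append _ _ h]; simp [h]), shed_append _ _ h]
      simp

theorem skip_phase (rest cur : List String)
    (h : ∀ x ∈ cur, bIsLead x = true) :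
    bPick (bBlocks rest cur) = PySem.Str.join "\n" (afsLoop rest true false []) := by
  induction rest generalizing cur with
  | nil => simp [bBlocks, bPick, afsLoop, shed_all_lead cur h, PySem.Str.join]
  | cons l r ih =>
    rw [step_notcollect]
    simp only [bBlocks]
    by_cases hb : bIsBoundary (PySem.Str.strip l) = true
    · -- terminator line: A skips it (not collecting), B closes an empty-after-shed block
      simp only [hb, Bool.true_or, if_true, bPick, shed_all_lead cur h]
      exact ih [] (by simp)
    · by_cases hl : bIsLead l = true
      · -- quote/H3 line: A skips it, B keeps it in the current block (shed later)
        simp only [hb, hl, Bool.or_true, if_true, Bool.false_eq_true, if_false]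
        exact ih (cur ++ [l]) (by
          intro x hx
          rcases List.mem_append.1 hx with hx | hx
          · exact h x hx
          · simp only [List.mem_singleton] at hx; simp [hx, hl])
      · -- paragraph starts at l: A begins collecting, B sheds the block down to l
        have hl' : bIsLead l = false := by simpa using hl
        have hshed : bShed (cur ++ [l]) = [l] := shed_lead_append cur l h hl'
        simp only [hb, hl, Bool.or_self, if_false, Bool.false_eq_true, List.nil_append]
        rw [pick_nonempty r (cur ++ [l]) (by simp [hshed]), hshed, afsLoop_collect]

theorem title_phase (lines : List String) :
    afsLoop lines false false [] =
      match bTail lines with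
      | none => []
      | some rest => afsLoop rest true false [] := by
  induction lines with
  | nil => simp [afsLoop, bTail]
  | cons l r ih =>
    simp only [afsLoop, bTail, Bool.not_false, if_true]
    by_cases h : PySem.Chars.startswith l.toList ['#', ' '] = true ∧
        PySem.Chars.startswith l.toList ['#', '#', ' '] = false
    · simp [h]
    · simp [h, ih]

-- ===== VERDICT (by name: the statement is the Claim_ definition above) =====
theorem extract_fallback_summary_spec : Claim_equal_extract_fallback_summary := by
  intro content _
  unfold Spec_extract_fallback_summary extract_fallback_summary extract_fallback_summary_alt
  rw [title_phase]
  cases bTail ((PySem.Str.split? content "\n").getD []) with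
  | none => simp [PySem.Str.join]
  | some rest => exact (skip_phase rest [] (by simp)).symm
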